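-- pv_equiv track=rewrite | github.com/retromorph/advanced-algorithms | notebooks/tmp2.py | optimal_per
-- ===== SOURCE A (Python) =====
-- def inv_mod2(lst):
--     if len(lst) <= 1:
--         return lst, 0
--
--     mid = len(lst) // 2
--     left, inv_l = inv_mod2(lst[:mid])
--     right, inv_r = inv_mod2(lst[mid:])
--     merged, inv = [], inv_l ^ inv_r
--     i = j = 0
--     while i < len(left) and j < len(right):
--         if left[i] <= right[j]:
--             merged.append(left[i]); i += 1
--         else:
--             merged.append(right[j])
--             inv ^= (len(left) - i) & 1
--             j += 1
--
--     merged.extend(left[i:])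
--     merged.extend(right[j:])
--     return merged, inv
--
-- def optimal_per(a, n):
--     if n < 4:
--         return a[:]
--
--     g0 = [a[i] for i in range(0, n, 2)]
--     g1 = [a[i] for i in range(1, n, 2)]
--     sorted_g0 = sorted(g0)
--     sorted_g1 = sorted(g1)
--     _, p0 = inv_mod2(g0)
--     _, p1 = inv_mod2(g1)
--
--     if p0 == p1:
--         final_g0, final_g1 = sorted_g0, sorted_g1
--     else:
--         if len(g0) > len(g1):
--             final_g0 = sorted_g0[:]
--             final_g0[-1], final_g0[-2] = final_g0[-2], final_g0[-1]
--             final_g1 = sorted_g1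
--         else:
--             final_g1 = sorted_g1[:]
--             final_g1[-1], final_g1[-2] = final_g1[-2], final_g1[-1]
--             final_g0 = sorted_g0
--
--     res = []
--     i0 = i1 = 0
--     for i in range(n):
--         if i % 2 == 0:
--             res.append(final_g0[i0])
--             i0 += 1
--         else:
--             res.append(final_g1[i1])
--             i1 += 1
--     return res
-- ===== SOURCE B (Python) =====
-- def _merge_count(left, right):
--     out, cnt, i, j = [], 0, 0, 0
--     while i < len(left) and j < len(right):
--         if right[j] < left[i]:
--             out.append(right[j])
--             cnt += len(left) - i
--             j += 1
--         else:
--             out.append(left[i])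
--             i += 1
--     out.extend(left[i:])
--     out.extend(right[j:])
--     return out, cnt
--
--
-- def _inv_parity(lst):
--     # bottom-up (iterative) merge passes over a worklist of sorted runs
--     runs = [[x] for x in lst]
--     total = 0
--     while len(runs) > 1:
--         nxt = []
--         k = 0
--         while k + 1 < len(runs):
--             merged, c = _merge_count(runs[k], runs[k + 1])
--             total += c
--             nxt.append(merged)
--             k += 2
--         if k < len(runs):
--             nxt.append(runs[k])
--         runs = nxt
--     return total & 1
--
--
-- def optimal_per(a, n):
--     if n < 4:
--         return a[:]
--     g0 = [a[i] for i in range(0, n, 2)]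
--     g1 = [a[i] for i in range(1, n, 2)]
--     s0 = sorted(g0)
--     s1 = sorted(g1)
--     if _inv_parity(g0) != _inv_parity(g1):
--         if len(g0) > len(g1):
--             s0 = s0[:-2] + [s0[-1], s0[-2]]
--         else:
--             s1 = s1[:-2] + [s1[-1], s1[-2]]
--     res = [v for pair in zip(s0, s1) for v in pair]
--     if n % 2:
--         res.append(s0[-1])
--     return res
-- ===== Notes on version B (the rewrite author's own statement) =====
-- stated objective: alternative
-- what changed: A counts inversion parity with a top-down recursive mergesort threading an XOR bit through nested merge calls; B computes it with an iterative bottom-up worklist of sorted runs (pairwise adjacent-run merges per pass, summed counts, parity once at the end), and renders the last-two swap as slicing and the interleave as zip-flatten instead of an index loop.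
-- outside the precondition, e.g. on optimal_per([1, 2, 3], 5): A raises IndexError, B raises IndexError
import Mathlib
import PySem

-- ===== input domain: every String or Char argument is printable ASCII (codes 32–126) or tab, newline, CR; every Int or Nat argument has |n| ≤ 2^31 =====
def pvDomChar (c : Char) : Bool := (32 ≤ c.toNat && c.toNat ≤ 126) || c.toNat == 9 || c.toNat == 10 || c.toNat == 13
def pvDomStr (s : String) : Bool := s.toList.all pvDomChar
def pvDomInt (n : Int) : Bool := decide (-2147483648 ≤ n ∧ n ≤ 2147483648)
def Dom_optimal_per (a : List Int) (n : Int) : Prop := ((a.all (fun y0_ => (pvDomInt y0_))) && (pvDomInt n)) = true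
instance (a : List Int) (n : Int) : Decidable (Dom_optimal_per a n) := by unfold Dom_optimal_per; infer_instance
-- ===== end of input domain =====

-- B replaces A's top-down recursive inversion-parity mergesort by an iterative bottom-up
-- worklist of sorted runs (plus slice/zip renderings of the swap and interleave): same values,
-- different decomposition ('alternative'); return-value equivalence, neither side mutates `a`.

-- ===== PORT A =====

-- the merge while-loop of inv_mod2: cursors i/j become structural recursion on the suffixes
-- left[i:], right[j:]; `(len(left) - i) & 1` is the length of the remaining left suffix
def pvMergeA : List Int → List Int → Nat → List Int × Nat
  | x :: ls, y :: rs, inv =>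
    if x ≤ y then
      let p := pvMergeA ls (y :: rs) inv
      (x :: p.1, p.2)
    else
      let p := pvMergeA (x :: ls) rs (inv ^^^ ((ls.length + 1) &&& 1))
      (y :: p.1, p.2)
  | l, r, inv => (l ++ r, inv)   -- merged.extend(left[i:]); merged.extend(right[j:])
  termination_by l r _ => l.length + r.length
  decreasing_by all_goals (simp; try omega)

-- lst[:mid] / lst[mid:] with mid = len(lst)//2 ≥ 0 are exactly take/drop
def inv_mod2 (lst : List Int) : List Int × Nat :=
  if lst.length ≤ 1 then (lst, 0)
  else
    let mid := lst.length / 2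
    let pl := inv_mod2 (lst.take mid)
    let pr := inv_mod2 (lst.drop mid)
    pvMergeA pl.1 pr.1 (pl.2 ^^^ pr.2)
  termination_by lst.length
  decreasing_by all_goals (simp; try omega)

-- `final[-1], final[-2] = final[-2], final[-1]`; exact whenever len ≥ 2 (always the case here,
-- since the swapped group has ≥ 2 elements when n ≥ 4)
def pvSwapLast2A (l : List Int) : List Int :=
  match l.reverse with
  | x :: y :: rest => rest.reverse ++ [x, y]
  | _ => l

-- `for i in range(n)` alternating between final_g0/final_g1: index parity becomes role swapping
def pvInterA : Nat → List Int → List Int → List Int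
  | 0, _, _ => []
  | Nat.succ k, f0, f1 =>
    match f0 with
    | [] => []          -- Python would raise; unreachable for the group lengths produced
    | x :: t => x :: pvInterA k f1 t

def optimal_per (a : List Int) (n : Int) : List Int :=
  if n < 4 then a
  else
    -- a[i] is in range for every i in range(0/1, n, 2) under Pre_ (4 ≤ n ≤ len a)
    let g0 := (PySem.List.pyRange 0 n 2).map (fun i => PySem.List.pyGetD a i 0)
    let g1 := (PySem.List.pyRange 1 n 2).map (fun i => PySem.List.pyGetD a i 0)
    let sorted_g0 := PySem.List.sorted g0 (fun x => x) false
    let sorted_g1 := PySem.List.sorted g1 (fun x => x) false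
    let p0 := (inv_mod2 g0).2
    let p1 := (inv_mod2 g1).2
    let fs :=
      if p0 = p1 then (sorted_g0, sorted_g1)
      else if g0.length > g1.length then (pvSwapLast2A sorted_g0, sorted_g1)
      else (sorted_g0, pvSwapLast2A sorted_g1)
    pvInterA n.toNat fs.1 fs.2

-- ===== PORT B =====

-- _merge_count's while-loop as recursion on the suffixes; cnt accumulates the full count
def pvMergeB : List Int → List Int → List Int × Nat
  | x :: ls, y :: rs =>
    if y < x then
      let p := pvMergeB (x :: ls) rs
      (y :: p.1, p.2 + (ls.length + 1))
    else
      let p := pvMergeB ls (y :: rs)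
      (x :: p.1, p.2)
  | l, r => (l ++ r, 0)
  termination_by l r => l.length + r.length
  decreasing_by all_goals (simp; try omega)

-- one pass of the outer while: merge adjacent runs pairwise, keep a trailing odd run
def pvPassB : List (List Int) → List (List Int) × Nat
  | r1 :: r2 :: rest =>
    let p := pvMergeB r1 r2
    let q := pvPassB rest
    (p.1 :: q.1, p.2 + q.2)
  | rs => (rs, 0)

-- needed by pvRunsB's termination: a pass halves (rounding up) the number of runs
theorem pvPassB_length (runs : List (List Int)) :
    (pvPassB runs).1.length = (runs.length + 1) / 2 := by
  induction runs using pvPassB.induct with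
  | case1 r1 r2 rest ih => simp [pvPassB, ih]; omega
  | case2 rs h => cases rs with
    | nil => simp [pvPassB]
    | cons r t =>
      cases t with
      | nil => simp [pvPassB]
      | cons r2 t2 => exact absurd rfl (h r r2 t2)

-- `while len(runs) > 1: … runs = nxt`
def pvRunsB (runs : List (List Int)) (total : Nat) : Nat :=
  if runs.length ≤ 1 then total &&& 1
  else pvRunsB (pvPassB runs).1 (total + (pvPassB runs).2)
  termination_by runs.length
  decreasing_by simp [pvPassB_length]; omega

def pvInvParityB (lst : List Int) : Nat := pvRunsB (lst.map (fun x => [x])) 0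

def optimal_per_alt (a : List Int) (n : Int) : List Int :=
  if n < 4 then a
  else
    let g0 := (PySem.List.pyRange 0 n 2).map (fun i => PySem.List.pyGetD a i 0)
    let g1 := (PySem.List.pyRange 1 n 2).map (fun i => PySem.List.pyGetD a i 0)
    let s0 := PySem.List.sorted g0 (fun x => x) false
    let s1 := PySem.List.sorted g1 (fun x => x) false
    let fs :=
      if pvInvParityB g0 ≠ pvInvParityB g1 then
        if g0.length > g1.length then
          (PySem.List.slice s0 none (some (-2)) ++
             [PySem.List.pyGetD s0 (-1) 0, PySem.List.pyGetD s0 (-2) 0], s1)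
        else
          (s0, PySem.List.slice s1 none (some (-2)) ++
             [PySem.List.pyGetD s1 (-1) 0, PySem.List.pyGetD s1 (-2) 0])
      else (s0, s1)
    (fs.1.zip fs.2).flatMap (fun p => [p.1, p.2]) ++
      (if PySem.Int.mod n 2 ≠ 0 then [PySem.List.pyGetD fs.1 (-1) 0] else [])

-- ===== PRECONDITION & SPEC =====
-- Pre_ excludes exactly the inputs where A raises IndexError: n ≥ 4 together with n > len(a)
def Pre_optimal_per (a : List Int) (n : Int) : Prop := n < 4 ∨ n ≤ (a.length : Int)
instance (a : List Int) (n : Int) : Decidable (Pre_optimal_per a n) := by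
  unfold Pre_optimal_per; infer_instance

def pvWitness_optimal_per : List Int × Int := ([3, 1, 2, 5, 4], 5)

def Spec_optimal_per (a : List Int) (n : Int) (out : List Int) : Prop := out = optimal_per_alt a n
instance (a : List Int) (n : Int) (out : List Int) : Decidable (Spec_optimal_per a n out) := by unfold Spec_optimal_per; infer_instance

-- ===== CLAIM (what is proved, stated in full; the proofs are below) =====
def Claim_equal_optimal_per : Prop := ∀ (a : List Int) (n : Int), Dom_optimal_per a n → Pre_optimal_per a n → Spec_optimal_per a n (optimal_per a n)

-- ===== LEMMAS AND PROOFS =====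

-- number of inversions (pairs out of order) of a list, and of pairs across two lists
def invCnt : List Int → Nat
  | [] => 0
  | x :: xs => xs.countP (fun y => decide (y < x)) + invCnt xs

def crossCnt (L R : List Int) : Nat :=
  (R.map (fun y => L.countP (fun x => decide (y < x)))).sum

theorem crossCnt_nil_left (R : List Int) : crossCnt [] R = 0 := by
  induction R with
  | nil => rfl
  | cons y t ih => simpa [crossCnt] using ih

theorem crossCnt_cons_left (x : Int) (L R : List Int) :
    crossCnt (x :: L) R = R.countP (fun y => decide (y < x)) + crossCnt L R := by
  induction R with
  | nil => rfl
  | cons y t ih =>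
    simp [crossCnt, List.countP_cons] at *
    rw [ih]
    by_cases h : y < x <;> simp [h] <;> omega

theorem crossCnt_cons_right (L : List Int) (y : Int) (R : List Int) :
    crossCnt L (y :: R) = L.countP (fun x => decide (y < x)) + crossCnt L R := by
  simp [crossCnt]

theorem crossCnt_append_left (A B R : List Int) :
    crossCnt (A ++ B) R = crossCnt A R + crossCnt B R := by
  induction A with
  | nil => simp [crossCnt_nil_left]
  | cons x t ih => simp [crossCnt_cons_left, ih]; omega

theorem crossCnt_append_right (L A B : List Int) :
    crossCnt L (A ++ B) = crossCnt L A + crossCnt L B := by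
  simp [crossCnt]

theorem crossCnt_perm_left {L L' : List Int} (h : L.Perm L') (R : List Int) :
    crossCnt L R = crossCnt L' R := by
  unfold crossCnt
  congr 1
  exact List.map_congr_left (fun y _ => h.countP_eq _)

theorem crossCnt_perm_right (L : List Int) {R R' : List Int} (h : R.Perm R') :
    crossCnt L R = crossCnt L R' := (h.map _).sum_eq

theorem invCnt_append (A B : List Int) :
    invCnt (A ++ B) = invCnt A + invCnt B + crossCnt A B := by
  induction A with
  | nil => simp [invCnt, crossCnt_nil_left]
  | cons x t ih =>
    simp only [List.cons_append, invCnt, List.countP_append, ih, crossCnt_cons_left]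
    omega

theorem invCnt_sorted_zero {l : List Int} (h : l.Pairwise (· ≤ ·)) : invCnt l = 0 := by
  induction l with
  | nil => rfl
  | cons x t ih =>
    rcases List.pairwise_cons.mp h with ⟨hx, ht⟩
    have : t.countP (fun y => decide (y < x)) = 0 := by
      rw [List.countP_eq_zero]
      intro y hy
      simpa using not_lt.mpr (hx y hy)
    simp [invCnt, this, ih ht]

theorem mod2_xor (a b : Nat) : (a % 2) ^^^ (b % 2) = (a + b) % 2 := by
  rcases Nat.mod_two_eq_zero_or_one a with h1 | h1 <;>
    rcases Nat.mod_two_eq_zero_or_one b with h2 | h2 <;>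
      rw [h1, h2, Nat.add_mod, h1, h2] <;> rfl

-- merge specification shared by both ports
theorem pvMergeA_spec (L R : List Int) (inv : Nat)
    (hL : L.Pairwise (· ≤ ·)) (hR : R.Pairwise (· ≤ ·)) :
    (pvMergeA L R inv).1.Pairwise (· ≤ ·) ∧ (pvMergeA L R inv).1.Perm (L ++ R) ∧
      (pvMergeA L R inv).2 = inv ^^^ (crossCnt L R % 2) := by
  induction L, R, inv using pvMergeA.induct with
  | case1 x ls y rs inv hxy ih =>
    rcases List.pairwise_cons.mp hL with ⟨hx, hls⟩
    rcases ih hls hR with ⟨s1, s2, s3⟩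
    have hcross : crossCnt (x :: ls) (y :: rs) = crossCnt ls (y :: rs) := by
      rw [crossCnt_cons_left]
      have : (y :: rs).countP (fun z => decide (z < x)) = 0 := by
        rw [List.countP_eq_zero]
        intro z hz
        rcases List.mem_cons.mp hz with h | h
        · simp [h]; omega
        · have := (List.pairwise_cons.mp hR).1 z h
          simp; omega
      omega
    refine ⟨?_, ?_, ?_⟩
    · simp only [pvMergeA, if_pos hxy]
      refine List.pairwise_cons.mpr ⟨?_, s1⟩
      intro b hb
      have hb' := s2.mem_iff.mp hb
      rcases List.mem_append.mp hb' with h | h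
      · exact hx b h
      · rcases List.mem_cons.mp h with h | h
        · omega
        · have := (List.pairwise_cons.mp hR).1 b h
          omega
    · simp only [pvMergeA, if_pos hxy]
      simpa using s2.cons x
    · simp only [pvMergeA, if_pos hxy, hcross]
      exact s3
  | case2 x ls y rs inv hxy ih =>
    rcases List.pairwise_cons.mp hR with ⟨hy, hrs⟩
    rcases ih hL hrs with ⟨s1, s2, s3⟩
    have hcnt : (x :: ls).countP (fun z => decide (y < z)) = ls.length + 1 := by
      rw [List.countP_eq_length.mpr]
      · simp
      · intro z hz
        rcases List.mem_cons.mp hz with h | h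
        · simp [h]; omega
        · have := (List.pairwise_cons.mp hL).1 z h
          simp; omega
    refine ⟨?_, ?_, ?_⟩
    · simp only [pvMergeA, if_neg hxy]
      refine List.pairwise_cons.mpr ⟨?_, s1⟩
      intro b hb
      have hb' := s2.mem_iff.mp hb
      rcases List.mem_append.mp hb' with h | h
      · rcases List.mem_cons.mp h with h | h
        · omega
        · have := (List.pairwise_cons.mp hL).1 b h
          omega
      · exact hy b h
    · simp only [pvMergeA, if_neg hxy]
      exact (s2.cons y).trans List.perm_middle.symm
    · simp only [pvMergeA, if_neg hxy, s3]
      rw [crossCnt_cons_right, hcnt, Nat.xor_assoc, Nat.and_one_is_mod, mod2_xor]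
  | case3 l r inv h =>
    have hnotboth : l = [] ∨ r = [] := by
      cases l with
      | nil => exact Or.inl rfl
      | cons x ls =>
        cases r with
        | nil => exact Or.inr rfl
        | cons y rs => exact absurd (h x ls y rs rfl rfl) (fun q => q)
    have hcross : crossCnt l r = 0 := by
      rcases hnotboth with h' | h' <;> subst h'
      · exact crossCnt_nil_left r
      · simp [crossCnt]
    refine ⟨?_, ?_, ?_⟩
    · rw [pvMergeA]
      · rcases hnotboth with h' | h' <;> subst h'
        · simpa using hR
        · simpa using hL
      · exact h
    · rw [pvMergeA]
      intro x ls y rs h1 h2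
      exact h x ls y rs h1 h2
    · rw [pvMergeA]
      · simp [hcross]
      · exact h

theorem pvMergeB_spec (L R : List Int)
    (hL : L.Pairwise (· ≤ ·)) (hR : R.Pairwise (· ≤ ·)) :
    (pvMergeB L R).1.Pairwise (· ≤ ·) ∧ (pvMergeB L R).1.Perm (L ++ R) ∧
      (pvMergeB L R).2 = crossCnt L R := by
  induction L, R using pvMergeB.induct with
  | case1 x ls y rs hxy ih =>
    rcases List.pairwise_cons.mp hR with ⟨hy, hrs⟩
    rcases ih hL hrs with ⟨s1, s2, s3⟩
    have hcnt : (x :: ls).countP (fun z => decide (y < z)) = ls.length + 1 := by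
      rw [List.countP_eq_length.mpr]
      · simp
      · intro z hz
        rcases List.mem_cons.mp hz with h | h
        · simp [h]; omega
        · have := (List.pairwise_cons.mp hL).1 z h
          simp; omega
    refine ⟨?_, ?_, ?_⟩
    · simp only [pvMergeB, if_pos hxy]
      refine List.pairwise_cons.mpr ⟨?_, s1⟩
      intro b hb
      have hb' := s2.mem_iff.mp hb
      rcases List.mem_append.mp hb' with h | h
      · rcases List.mem_cons.mp h with h | h
        · omega
        · have := (List.pairwise_cons.mp hL).1 b h
          omega
      · exact hy b h
    · simp only [pvMergeB, if_pos hxy]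
      exact (s2.cons y).trans List.perm_middle.symm
    · simp only [pvMergeB, if_pos hxy, s3]
      rw [crossCnt_cons_right, hcnt]
      omega
  | case2 x ls y rs hxy ih =>
    rcases List.pairwise_cons.mp hL with ⟨hx, hls⟩
    rcases ih hls hR with ⟨s1, s2, s3⟩
    have hcross : crossCnt (x :: ls) (y :: rs) = crossCnt ls (y :: rs) := by
      rw [crossCnt_cons_left]
      have : (y :: rs).countP (fun z => decide (z < x)) = 0 := by
        rw [List.countP_eq_zero]
        intro z hz
        rcases List.mem_cons.mp hz with h | h
        · simp [h]; omega
        · have := (List.pairwise_cons.mp hR).1 z h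
          simp; omega
      omega
    refine ⟨?_, ?_, ?_⟩
    · simp only [pvMergeB, if_neg hxy]
      refine List.pairwise_cons.mpr ⟨?_, s1⟩
      intro b hb
      have hb' := s2.mem_iff.mp hb
      rcases List.mem_append.mp hb' with h | h
      · exact hx b h
      · rcases List.mem_cons.mp h with h | h
        · omega
        · have := (List.pairwise_cons.mp hR).1 b h
          omega
    · simp only [pvMergeB, if_neg hxy]
      simpa using s2.cons x
    · simp only [pvMergeB, if_neg hxy, hcross]
      exact s3
  | case3 l r h =>
    have hnotboth : l = [] ∨ r = [] := by
      cases l with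
      | nil => exact Or.inl rfl
      | cons x ls =>
        cases r with
        | nil => exact Or.inr rfl
        | cons y rs => exact absurd (h x ls y rs rfl rfl) (fun q => q)
    have hcross : crossCnt l r = 0 := by
      rcases hnotboth with h' | h' <;> subst h'
      · exact crossCnt_nil_left r
      · simp [crossCnt]
    refine ⟨?_, ?_, ?_⟩
    · rw [pvMergeB]
      · rcases hnotboth with h' | h' <;> subst h'
        · simpa using hR
        · simpa using hL
      · exact h
    · rw [pvMergeB]
      intro x ls y rs h1 h2
      exact h x ls y rs h1 h2
    · rw [pvMergeB]
      · simp [hcross]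
      · exact h

theorem inv_mod2_spec (l : List Int) :
    (inv_mod2 l).1.Pairwise (· ≤ ·) ∧ (inv_mod2 l).1.Perm l ∧
      (inv_mod2 l).2 = invCnt l % 2 := by
  induction l using inv_mod2.induct with
  | case1 l hlen =>
    have h0 : invCnt l = 0 := by
      match l, hlen with
      | [], _ => rfl
      | [x], _ => simp [invCnt]
    rw [inv_mod2, if_pos hlen]
    refine ⟨?_, List.Perm.refl l, by simp [h0]⟩
    match l, hlen with
    | [], _ => simp
    | [x], _ => simp
  | case2 l hlen mid ihl ihr =>
    rcases ihl with ⟨a1, a2, a3⟩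
    rcases ihr with ⟨b1, b2, b3⟩
    rw [inv_mod2, if_neg hlen]
    simp only
    rcases pvMergeA_spec (inv_mod2 (l.take mid)).1 (inv_mod2 (l.drop mid)).1
      ((inv_mod2 (l.take mid)).2 ^^^ (inv_mod2 (l.drop mid)).2) a1 b1 with ⟨m1, m2, m3⟩
    refine ⟨m1, ?_, ?_⟩
    · exact m2.trans (((a2.append b2).trans (by rw [List.take_append_drop])))
    · rw [m3, a3, b3]
      rw [crossCnt_perm_left a2, crossCnt_perm_right _ b2]
      conv_rhs => rw [← List.take_append_drop mid l]
      rw [invCnt_append, mod2_xor, mod2_xor]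

theorem pvPassB_spec (runs : List (List Int)) (h : ∀ r ∈ runs, r.Pairwise (· ≤ ·)) :
    (∀ r ∈ (pvPassB runs).1, r.Pairwise (· ≤ ·)) ∧
      (pvPassB runs).1.flatten.Perm runs.flatten ∧
      invCnt runs.flatten = (pvPassB runs).2 + invCnt (pvPassB runs).1.flatten := by
  induction runs using pvPassB.induct with
  | case1 r1 r2 rest ih =>
    have h1 := h r1 (by simp)
    have h2 := h r2 (by simp)
    have hrest : ∀ r ∈ rest, r.Pairwise (· ≤ ·) := fun r hr => h r (by simp [hr])
    rcases ih hrest with ⟨i1, i2, i3⟩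
    rcases pvMergeB_spec r1 r2 h1 h2 with ⟨m1, m2, m3⟩
    have hpv : pvPassB (r1 :: r2 :: rest) =
        ((pvMergeB r1 r2).1 :: (pvPassB rest).1,
          (pvMergeB r1 r2).2 + (pvPassB rest).2) := rfl
    rw [hpv]
    refine ⟨?_, ?_, ?_⟩
    · intro r hr
      rcases List.mem_cons.mp hr with h' | h'
      · rw [h']; exact m1
      · exact i1 r h'
    · simp only [List.flatten_cons]
      exact (m2.append i2).trans (List.Perm.of_eq (by simp))
    · simp only [List.flatten_cons]
      rw [invCnt_append, invCnt_append, crossCnt_append_right, invCnt_append]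
      have e1 : invCnt r1 = 0 := invCnt_sorted_zero h1
      have e2 : invCnt r2 = 0 := invCnt_sorted_zero h2
      have e3 : invCnt (pvMergeB r1 r2).1 = 0 := invCnt_sorted_zero m1
      have e4 : crossCnt (pvMergeB r1 r2).1 (pvPassB rest).1.flatten =
          crossCnt r1 rest.flatten + crossCnt r2 rest.flatten := by
        rw [crossCnt_perm_left m2, crossCnt_append_left,
          crossCnt_perm_right _ i2, crossCnt_perm_right _ i2]
      rw [e1, e2, e3, e4, m3]
      omega
  | case2 rs h' =>
    have hid : pvPassB rs = (rs, 0) := by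
      match rs, h' with
      | [], _ => rfl
      | [r], _ => rfl
      | r1 :: r2 :: rest, h' => exact absurd (h' r1 r2 rest rfl) (fun q => q)
    rw [hid]
    exact ⟨h, List.Perm.refl _, by simp⟩

theorem pvRunsB_spec (runs : List (List Int)) (total : Nat)
    (h : ∀ r ∈ runs, r.Pairwise (· ≤ ·)) :
    pvRunsB runs total = (total + invCnt runs.flatten) % 2 := by
  induction runs, total using pvRunsB.induct with
  | case1 runs total hlen =>
    have h0 : invCnt runs.flatten = 0 := by
      match runs, hlen with
      | [], _ => rfl
      | [r], _ => simpa using invCnt_sorted_zero (h r (by simp))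
    rw [pvRunsB, if_pos hlen, h0, Nat.and_one_is_mod]
    omega
  | case2 runs total hlen ih =>
    rcases pvPassB_spec runs h with ⟨p1, _, p3⟩
    rw [pvRunsB, if_neg hlen, ih p1, p3]
    omega

theorem pvInvParityB_eq (l : List Int) : pvInvParityB l = invCnt l % 2 := by
  unfold pvInvParityB
  rw [pvRunsB_spec _ 0 (by intro r hr; rcases List.mem_map.mp hr with ⟨x, _, hx⟩; rw [← hx]; simp)]
  have : (List.map (fun x => [x]) l).flatten = l := by
    induction l with
    | nil => rfl
    | cons x t ih => simp [ih]
  rw [this]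
  omega
theorem parity_agree (l : List Int) : (inv_mod2 l).2 = pvInvParityB l := by
  rw [pvInvParityB_eq]; exact (inv_mod2_spec l).2.2

-- the two renderings of the last-two swap agree on lists of length ≥ 2
theorem swap_agree (l : List Int) (h : 2 ≤ l.length) :
    pvSwapLast2A l =
      PySem.List.slice l none (some (-2)) ++
        [PySem.List.pyGetD l (-1) 0, PySem.List.pyGetD l (-2) 0] := by
  match hr : l.reverse with
  | [] =>
    exfalso
    have h0 : l.length = 0 := by simpa using congrArg List.length hr
    omega
  | [x] =>
    exfalso
    have h0 : l.length = 1 := by simpa using congrArg List.length hr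
    omega
  | x :: y :: rest =>
    have hl : l = rest.reverse ++ [y, x] := by
      have := congrArg List.reverse hr
      simpa using this
    have hlen : l.length = rest.length + 2 := by rw [hl]; simp
    have hswap : pvSwapLast2A l = rest.reverse ++ [x, y] := by
      unfold pvSwapLast2A; rw [hr]
    have htake : List.take (l.length - 2) l = rest.reverse := by
      rw [hlen, hl]
      simpa using List.take_left rest.reverse [y, x]
    have hm1 : PySem.List.pyGetD l (-1) 0 = x := by
      rw [hl, show rest.reverse ++ [y, x] = (rest.reverse ++ [y]) ++ [x] by simp]
      exact PySem.List.pyGetD_neg_one_append_singleton _ _ _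
    have hm2 : PySem.List.pyGetD l (-2) 0 = y := by
      rw [PySem.List.pyGetD_neg_ofNat l 2 0 (by omega) (by omega)]
      have hopt : l[l.length - 2]? = some y := by
        rw [hlen, hl]
        simp [List.getElem?_append_right]
      rw [List.getElem?_eq_getElem (by omega)] at hopt
      exact Option.some.inj hopt
    rw [hswap, PySem.List.slice_to_neg_ofNat l 2 (by omega), htake, hm1, hm2]

-- the two renderings of the interleave agree when the group lengths fit
theorem inter_agree (f1 f0 : List Int)
    (h : f0.length = f1.length ∨ f0.length = f1.length + 1) :
    pvInterA (f0.length + f1.length) f0 f1 =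
      (f0.zip f1).flatMap (fun p => [p.1, p.2]) ++
        (if f0.length = f1.length + 1 then [PySem.List.pyGetD f0 (-1) 0] else []) := by
  induction f1 generalizing f0 with
  | nil =>
    rcases h with h | h
    · have : f0 = [] := List.length_eq_zero_iff.mp (by simpa using h)
      subst this
      simp [pvInterA]
    · match f0, h with
      | [x], _ =>
        have h1 : PySem.List.pyGetD [x] (-1) 0 = x := by
          rw [PySem.List.pyGetD_neg_one [x] 0 (by simp)]
          rfl
        simp [pvInterA, h1]
  | cons y t1 ih =>
    match f0, h with
    | x :: t0, h =>
      have hstep : pvInterA ((x :: t0).length + (y :: t1).length) (x :: t0) (y :: t1) =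
          x :: y :: pvInterA (t0.length + t1.length) t0 t1 := by
        have e : (x :: t0).length + (y :: t1).length = (t0.length + t1.length) + 1 + 1 := by
          simp; omega
        rw [e]
        rfl
      have h' : t0.length = t1.length ∨ t0.length = t1.length + 1 := by
        simp at h; omega
      rw [hstep, ih t0 h']
      have hc : (x :: t0).length = (y :: t1).length + 1 ↔ t0.length = t1.length + 1 := by
        simp
      by_cases hodd : t0.length = t1.length + 1
      · have ht0 : t0 ≠ [] := by
          intro hnil; rw [hnil] at hodd; simp at hodd
        have hlast : PySem.List.pyGetD (x :: t0) (-1) 0 = PySem.List.pyGetD t0 (-1) 0 := by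
          rw [PySem.List.pyGetD_neg_one (x :: t0) 0 (by simp),
            PySem.List.pyGetD_neg_one t0 0 ht0]
          exact List.getLast_cons ht0
        simp only [if_pos hodd, if_pos (hc.mpr hodd), hlast]
        simp
      · simp only [if_neg hodd, if_neg (fun hh => hodd (hc.mp hh))]
        simp

-- ===== VERDICT (by name: the statement is the Claim_ definition above) =====
theorem sorted_len (g : List Int) :
    (PySem.List.sorted g (fun x => x) false).length = g.length :=
  PySem.List.length_sorted g _ _

theorem swapLast2_len (l : List Int) (h : 2 ≤ l.length) :
    (pvSwapLast2A l).length = l.length := by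
  rw [swap_agree l h, PySem.List.slice_to_neg_ofNat l 2 (by omega)]
  simp
  omega

theorem optimal_per_spec : Claim_equal_optimal_per := by
  intro a n _ hpre
  unfold Spec_optimal_per optimal_per optimal_per_alt
  by_cases h4 : n < 4
  · simp [h4]
  · simp only [if_neg h4]
    set G0 := (PySem.List.pyRange 0 n 2).map (fun i => PySem.List.pyGetD a i 0) with hG0
    set G1 := (PySem.List.pyRange 1 n 2).map (fun i => PySem.List.pyGetD a i 0) with hG1
    set S0 := PySem.List.sorted G0 (fun x => x) false with hS0
    set S1 := PySem.List.sorted G1 (fun x => x) false with hS1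
    have hlen0 : G0.length = (n.toNat + 1) / 2 := by
      rw [hG0, List.length_map, PySem.List.pyRange_of_pos 0 n (by omega), List.length_map,
        List.length_range]
      rw [if_pos (by omega : (0:Int) < n)]
      omega
    have hlen1 : G1.length = n.toNat / 2 := by
      rw [hG1, List.length_map, PySem.List.pyRange_of_pos 1 n (by omega), List.length_map,
        List.length_range]
      rw [if_pos (by omega : (1:Int) < n)]
      omega
    have hn4 : 4 ≤ n.toNat := by
      rcases hpre with h | h
      · omega
      · omega
    have hs0len : S0.length = (n.toNat + 1) / 2 := by rw [hS0, sorted_len, hlen0]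
    have hs1len : S1.length = n.toNat / 2 := by rw [hS1, sorted_len, hlen1]
    have hswapS0 : PySem.List.slice S0 none (some (-2)) ++
        [PySem.List.pyGetD S0 (-1) 0, PySem.List.pyGetD S0 (-2) 0] = pvSwapLast2A S0 :=
      (swap_agree S0 (by omega)).symm
    have hswapS1 : PySem.List.slice S1 none (some (-2)) ++
        [PySem.List.pyGetD S1 (-1) 0, PySem.List.pyGetD S1 (-2) 0] = pvSwapLast2A S1 :=
      (swap_agree S1 (by omega)).symm
    have hswl0 : (pvSwapLast2A S0).length = S0.length := swapLast2_len S0 (by omega)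
    have hswl1 : (pvSwapLast2A S1).length = S1.length := swapLast2_len S1 (by omega)
    have hmod : (PySem.Int.mod n 2 ≠ 0) ↔ n.toNat % 2 = 1 := by
      have : PySem.Int.mod n 2 = n % 2 := by
        simp [PySem.Int.mod]
        rw [Int.fmod_eq_emod]
        simp
      rw [this]
      omega
    rw [hswapS0, hswapS1]
    simp only [parity_agree]
    by_cases hp : pvInvParityB G0 = pvInvParityB G1
    · simp only [if_pos hp, if_neg (not_not_intro hp)]
      rw [show n.toNat = S0.length + S1.length by omega]
      rw [inter_agree S1 S0 (by omega)]
      congr 1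
      by_cases hodd : S0.length = S1.length + 1
      · rw [if_pos hodd, if_pos (hmod.mpr (by omega))]
      · rw [if_neg hodd, if_neg (fun hh => hodd (by have := hmod.mp hh; omega))]
    · simp only [if_neg hp, if_pos hp]
      by_cases hgt : G0.length > G1.length
      · simp only [if_pos hgt]
        rw [show n.toNat = (pvSwapLast2A S0).length + S1.length by omega]
        rw [inter_agree S1 (pvSwapLast2A S0) (by omega)]
        congr 1
        by_cases hodd : (pvSwapLast2A S0).length = S1.length + 1
        · rw [if_pos hodd, if_pos (hmod.mpr (by omega))]
        · rw [if_neg hodd, if_neg (fun hh => hodd (by have := hmod.mp hh; omega))]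
      · simp only [if_neg hgt]
        rw [show n.toNat = S0.length + (pvSwapLast2A S1).length by omega]
        rw [inter_agree (pvSwapLast2A S1) S0 (by omega)]
        congr 1
        by_cases hodd : S0.length = (pvSwapLast2A S1).length + 1
        · rw [if_pos hodd, if_pos (hmod.mpr (by omega))]
        · rw [if_neg hodd, if_neg (fun hh => hodd (by have := hmod.mp hh; omega))]
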